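-- pv_equiv track=rewrite | github.com/SPOOKEXE/RobloxStableDiffusionHookV2 | python/image.py | greedy_fill_search
-- ===== SOURCE A (Python) =====
-- def greedy_fill_search( pixels : list, startIndex : int ) -> tuple:
-- 	value : list = pixels[startIndex]
-- 	count : int = 1
-- 	while startIndex < len(pixels) - 1:
-- 		startIndex += 1
-- 		idx_value : list = pixels[ startIndex ]
-- 		if value == idx_value:
-- 			count += 1
-- 		else:
-- 			break
-- 	return count, value
-- ===== SOURCE B (Python) =====
-- def greedy_fill_search( pixels : list, startIndex : int ) -> tuple:
-- 	value : list = pixels[startIndex]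
-- 	n : int = len(pixels)
-- 	# stage 1: a backward DP pass building, for every position, the length of the
-- 	# maximal run of equal pixels starting there
-- 	run : list = [1] * n
-- 	for i in range(n - 2, -1, -1):
-- 		if pixels[i] == pixels[i + 1]:
-- 			run[i] = run[i + 1] + 1
-- 	# stage 2: O(1) table lookup at the (normalised) start position
-- 	j : int = startIndex if startIndex >= 0 else startIndex + n
-- 	return run[j], value
-- ===== Notes on version B (the rewrite author's own statement) =====
-- stated objective: alternative
-- what changed: Replaces A's forward counter-and-break while loop by a two-stage algorithm: a backward dynamic-programming pass builds a table of run lengths (run[i] = length of the maximal equal-run starting at i), then the answer is an O(1) lookup of that table at the normalised start position.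
-- intended difference: For a negative in-range startIndex whose run of equal pixels reaches the end of the list and whose first pixel equals that value, A's loop index wraps past the end and re-counts pixels from the front (e.g. A([[1]], -1) = (2, [1]) from a one-element list), while B returns the length of the run starting at the indexed position ((1, [1])), the intended count. — e.g. on greedy_fill_search([[1]], -1): A returns (2, [1]), B returns (1, [1])
import Mathlib
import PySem

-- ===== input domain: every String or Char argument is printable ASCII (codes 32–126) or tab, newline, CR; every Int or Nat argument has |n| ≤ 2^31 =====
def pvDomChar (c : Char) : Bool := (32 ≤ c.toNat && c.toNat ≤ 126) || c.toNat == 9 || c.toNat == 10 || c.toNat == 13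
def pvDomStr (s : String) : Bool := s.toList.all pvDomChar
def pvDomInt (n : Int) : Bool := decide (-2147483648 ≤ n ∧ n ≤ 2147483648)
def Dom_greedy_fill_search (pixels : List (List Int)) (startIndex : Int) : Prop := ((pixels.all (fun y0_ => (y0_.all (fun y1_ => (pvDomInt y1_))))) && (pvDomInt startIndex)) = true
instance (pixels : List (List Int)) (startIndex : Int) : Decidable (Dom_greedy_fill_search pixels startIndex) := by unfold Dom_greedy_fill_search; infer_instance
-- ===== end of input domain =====

-- B replaces A's forward counter-and-break while loop by a backward DP pass that builds a table
-- of run lengths and then looks it up once at the (normalised) start position (objective: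
-- alternative). Return-value equivalence only; neither version mutates its arguments.

-- ===== PORT A =====
-- the `while startIndex < len(pixels)-1` loop; fuel = (len(pixels)-1-startIndex).toNat, which
-- mirrors the guard exactly: fuel = 0 ↔ the guard is false.
def greedyLoop (pixels : List (List Int)) (value : List Int) : Nat → Int → Int → Int
  | 0, _, count => count
  | fuel+1, si, count =>
    match PySem.List.pyGet? pixels (si+1) with
    | none => count              -- Python raises IndexError here; unreachable under Pre_
    | some idxValue => if value == idxValue then greedyLoop pixels value fuel (si+1) (count+1) else count

def greedy_fill_search (pixels : List (List Int)) (startIndex : Int) : Int × List Int :=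
  match PySem.List.pyGet? pixels startIndex with
  | none => (0, [])              -- Python raises IndexError; excluded by Pre_
  | some value =>
      (greedyLoop pixels value ((pixels.length - 1 - startIndex).toNat) startIndex 1, value)

-- ===== PORT B =====
-- Source B's backward loop `for i in range(n-2,-1,-1): if pixels[i]==pixels[i+1]: run[i]=run[i+1]+1`
-- (over `run = [1]*n`) ported as structural recursion building the run-length table back-to-front:
-- each step produces run[i] from run[i+1] exactly as the loop body does.
def runTable : List (List Int) → List Int
  | [] => []
  | [_] => [1]
  | x :: y :: t => (if x == y then (runTable (y :: t)).headI + 1 else 1) :: runTable (y :: t)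

def greedy_fill_search_alt (pixels : List (List Int)) (startIndex : Int) : Int × List Int :=
  match PySem.List.pyGet? pixels startIndex with
  | none => (0, [])              -- Python raises IndexError; excluded by Pre_
  | some value =>
      let j : Int := if 0 ≤ startIndex then startIndex else startIndex + pixels.length
      ((runTable pixels).getD j.toNat 0, value)   -- run[j]; j is in range whenever pyGet? succeeded

-- ===== PRECONDITION & SPEC =====
-- Pre_ excludes exactly the inputs where Python's pixels[startIndex] raises IndexError.
def Pre_greedy_fill_search (pixels : List (List Int)) (startIndex : Int) : Prop :=
  -(pixels.length : Int) ≤ startIndex ∧ startIndex < (pixels.length : Int)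
instance (pixels : List (List Int)) (startIndex : Int) : Decidable (Pre_greedy_fill_search pixels startIndex) := by unfold Pre_greedy_fill_search; infer_instance
def pvWitness_greedy_fill_search : List (List Int) × Int := ([[0], [1]], 0)

-- For a NEGATIVE startIndex whose run of equal pixels reaches the end of the list and whose first
-- pixel equals that value, A's loop index wraps past the end and re-counts pixels from the front
-- (e.g. ([[1]], -1) yields count 2 from a 1-element list), while B returns the length of the run
-- starting at the indexed position, the intended count.
def D_greedy_fill_search (pixels : List (List Int)) (startIndex : Int) : Prop :=
  pixels ≠ [] ∧ -(pixels.length : Int) ≤ startIndex ∧ startIndex < 0 ∧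
  (let t := pixels.drop (startIndex + pixels.length).toNat;
   (t.all (fun p => p == t.headI)) = true ∧ pixels.headI = t.headI)
instance (pixels : List (List Int)) (startIndex : Int) : Decidable (D_greedy_fill_search pixels startIndex) := by unfold D_greedy_fill_search; infer_instance

def Spec_greedy_fill_search (pixels : List (List Int)) (startIndex : Int) (out : Int × List Int) : Prop := ¬ D_greedy_fill_search pixels startIndex → out = greedy_fill_search_alt pixels startIndex
instance (pixels : List (List Int)) (startIndex : Int) (out : Int × List Int) : Decidable (Spec_greedy_fill_search pixels startIndex out) := by unfold Spec_greedy_fill_search; infer_instance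

def pvDiffWitness_greedy_fill_search : List (List Int) × Int := ([[1]], -1)
def pvDiffWitnessOut_greedy_fill_search : (Int × List Int) × (Int × List Int) := ((2, [1]), (1, [1]))

-- ===== CLAIM (what is proved, stated in full; the proofs are below) =====
def Claim_unchanged_greedy_fill_search : Prop := ∀ (pixels : List (List Int)) (startIndex : Int), Dom_greedy_fill_search pixels startIndex → Pre_greedy_fill_search pixels startIndex → Spec_greedy_fill_search pixels startIndex (greedy_fill_search pixels startIndex)
def Claim_changed_greedy_fill_search : Prop := Dom_greedy_fill_search (pvDiffWitness_greedy_fill_search.1) (pvDiffWitness_greedy_fill_search.2) ∧ Pre_greedy_fill_search (pvDiffWitness_greedy_fill_search.1) (pvDiffWitness_greedy_fill_search.2) ∧ D_greedy_fill_search (pvDiffWitness_greedy_fill_search.1) (pvDiffWitness_greedy_fill_search.2) ∧ greedy_fill_search (pvDiffWitness_greedy_fill_search.1) (pvDiffWitness_greedy_fill_search.2) = pvDiffWitnessOut_greedy_fill_search.1 ∧ greedy_fill_search_alt (pvDiffWitness_greedy_fill_search.1) (pvDiffWitness_greedy_fill_search.2) = pvDiffWitnessOut_greedy_fill_search.2 ∧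 pvDiffWitnessOut_greedy_fill_search.1 ≠ pvDiffWitnessOut_greedy_fill_search.2
def Claim_exact_greedy_fill_search : Prop := ∀ (pixels : List (List Int)) (startIndex : Int), Dom_greedy_fill_search pixels startIndex → Pre_greedy_fill_search pixels startIndex → D_greedy_fill_search pixels startIndex → greedy_fill_search pixels startIndex ≠ greedy_fill_search_alt pixels startIndex

-- ===== LEMMAS AND PROOFS =====

-- length of the initial run of elements equal to v (a characterisation both proofs reduce to)
def runLen (v : List Int) : List (List Int) → Int
  | [] => 0
  | x :: t => if x == v then 1 + runLen v t else 0

-- the values A's loop reads after position i: the rest of the list, preceded (when i is negative,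
-- where Python indexing wraps) by the tail it reads through negative indices
def readSeq (pixels : List (List Int)) (i : Int) : List (List Int) :=
  if i < 0 then pixels.drop (i + 1 + pixels.length).toNat ++ pixels else pixels.drop (i + 1).toNat

theorem runLen_nonneg (v : List Int) (l : List (List Int)) : 0 ≤ runLen v l := by
  induction l with
  | nil => simp [runLen]
  | cons x t ih => simp only [runLen]; split <;> omega

theorem runLen_eq_zero (v : List Int) (l : List (List Int)) (h : l.headI ≠ v) : runLen v l = 0 := by
  cases l with
  | nil => rfl
  | cons x t =>
      simp only [List.headI_cons] at h
      simp [runLen, h]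

theorem runLen_pos (v : List Int) (l : List (List Int)) (h : l ≠ []) (hh : l.headI = v) :
    1 ≤ runLen v l := by
  cases l with
  | nil => exact absurd rfl h
  | cons x t =>
      simp only [List.headI_cons] at hh
      have := runLen_nonneg v t
      simp [runLen, hh]
      omega

theorem runLen_all (v : List Int) (l : List (List Int)) (h : l.all (fun p => p == v)) :
    runLen v l = l.length := by
  induction l with
  | nil => simp [runLen]
  | cons x t ih =>
      simp only [List.all_cons, Bool.and_eq_true] at h
      simp [runLen, h.1, ih h.2]
      omega

theorem runLen_append (v : List Int) (l m : List (List Int)) :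
    runLen v (l ++ m) = if l.all (fun p => p == v) then (l.length : Int) + runLen v m else runLen v l := by
  induction l with
  | nil => simp
  | cons x t ih =>
      by_cases hx : x == v
      · simp [runLen, hx, ih]
        split <;> omega
      · simp [runLen, hx]

-- B's table entry j is 1 + the run length starting just after j (for the value at j)
theorem runTable_getD (l : List (List Int)) : ∀ (j : Nat) (hj : j < l.length),
    (runTable l).getD j 0 = 1 + runLen (l[j]'hj) (l.drop (j+1)) := by
  induction l with
  | nil => intro j hj; simp at hj
  | cons x t ih =>
      intro j hj
      cases t with
      | nil =>
          have hj0 : j = 0 := by simpa using hj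
          subst hj0
          simp [runTable, runLen]
      | cons y t' =>
          cases j with
          | zero =>
              have hne : runTable (y :: t') ≠ [] := by
                cases t' <;> simp [runTable]
              have ih0' : (runTable (y :: t')).headI = 1 + runLen y t' := by
                cases ht : runTable (y :: t') with
                | nil => exact absurd ht hne
                | cons a r =>
                    have := ih 0 (by simp)
                    rw [ht] at this
                    simpa [runLen] using this
              by_cases hxy : x == y
              · have hxy' : x = y := by simpa using hxy
                simp [runTable, ih0', runLen, hxy']
                omega
              · have hxy' : ¬ (y == x) := by
                  simp only [beq_iff_eq] at hxy ⊢; exact fun h => hxy h.symm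
                simp [runTable, hxy, runLen, hxy']
          | succ k =>
              have hk : k < (y :: t').length := by simpa using hj
              have := ih k hk
              simpa [runTable] using this

-- A's loop computes count + runLen over the read sequence
theorem pyGet_neg (xs : List (List Int)) (i : Int) (h1 : -(xs.length : Int) ≤ i) (h2 : i < 0) :
    PySem.List.pyGet? xs i = xs[(i + xs.length).toNat]? := by
  have hk : i = -(((-i).toNat : Nat) : Int) := by omega
  rw [hk, PySem.List.pyGet?_neg_natCast xs (-i).toNat (by omega) (by omega)]
  congr 1
  omega

theorem loop_run (pixels : List (List Int)) (v : List Int) :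
    ∀ (fuel : Nat) (i c : Int), -(pixels.length : Int) ≤ i →
    ((pixels.length : Int) - 1 - i).toNat = fuel →
    greedyLoop pixels v fuel i c = c + runLen v (readSeq pixels i) := by
  intro fuel
  induction fuel with
  | zero =>
      intro i c h1 hf
      have hi : 0 ≤ i := by
        by_contra h
        have : (pixels.length : Int) = 0 := by omega
        omega
      have : pixels.length ≤ (i + 1).toNat := by omega
      simp [greedyLoop, readSeq, not_lt.mpr hi, List.drop_eq_nil_of_le this, runLen]
  | succ k ih =>
      intro i c h1 hf
      have hlt : i + 1 < (pixels.length : Int) := by omega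
      have hcons : ∃ (x : List Int), PySem.List.pyGet? pixels (i+1) = some x ∧
          readSeq pixels i = x :: readSeq pixels (i+1) := by
        by_cases hneg : i + 1 < 0
        · have hb : (i + 1 + pixels.length).toNat < pixels.length := by omega
          refine ⟨pixels[(i + 1 + pixels.length).toNat], ?_, ?_⟩
          · rw [pyGet_neg pixels (i+1) (by omega) hneg, List.getElem?_eq_getElem hb]
          · simp only [readSeq, if_pos (by omega : i < 0), if_pos hneg]
            rw [List.drop_eq_getElem_cons hb]
            simp only [List.cons_append]
            congr 3
            omega
        · by_cases hi : i < 0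
          · have hie : i = -1 := by omega
            subst hie
            have h0 : 0 < pixels.length := by omega
            refine ⟨pixels[0], ?_, ?_⟩
            · rw [show (-1:Int) + 1 = 0 by norm_num, PySem.List.pyGet?_of_nonneg pixels le_rfl]
              simp [List.getElem?_eq_getElem h0]
            · have hA : readSeq pixels (-1) = pixels := by
                simp only [readSeq, if_pos (show (-1:Int) < 0 by norm_num)]
                rw [List.drop_eq_nil_of_le
                  (by omega : pixels.length ≤ ((-1:Int) + 1 + (pixels.length:Int)).toNat),
                  List.nil_append]
              have hB : readSeq pixels ((-1:Int) + 1) = pixels.drop 1 := by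
                simp only [readSeq, show (-1:Int) + 1 = 0 by norm_num,
                  if_neg (show ¬ (0:Int) < 0 by norm_num)]
                norm_num
              rw [hA, hB]
              have hc := List.drop_eq_getElem_cons h0 (l := pixels)
              rw [List.drop_zero] at hc
              simpa using hc
          · have hb : (i+1).toNat < pixels.length := by omega
            refine ⟨pixels[(i+1).toNat], ?_, ?_⟩
            · rw [PySem.List.pyGet?_of_nonneg pixels (by omega), List.getElem?_eq_getElem hb]
            · simp only [readSeq, if_neg hi, if_neg (by omega : ¬ i + 1 < 0)]
              rw [List.drop_eq_getElem_cons hb]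
              congr 2
              omega
      obtain ⟨x, hget, hseq⟩ := hcons
      rw [hseq]
      by_cases hvx : v == x
      · have hx' : (x == v) = true := by
          rw [beq_iff_eq] at hvx ⊢
          exact hvx.symm
        simp only [greedyLoop, hget, hvx, if_true]
        rw [ih (i+1) (c+1) (by omega) (by omega)]
        simp [runLen, hx']
        omega
      · have hx' : ¬ ((x == v) = true) := by
          rw [beq_iff_eq] at hvx ⊢
          exact fun h => hvx h.symm
        simp only [greedyLoop, hget, hvx]
        simp [runLen, hx']

-- both ports evaluated at a negative in-range start index
theorem neg_eval (pixels : List (List Int)) (s : Int) (h1 : -(pixels.length : Int) ≤ s)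
    (h2 : s < 0) (j : Nat) (hjdef : (s + (pixels.length : Int)).toNat = j)
    (hj : j < pixels.length) :
    greedy_fill_search pixels s
      = (1 + runLen (pixels[j]'hj) (pixels.drop (j+1) ++ pixels), pixels[j]'hj) ∧
    greedy_fill_search_alt pixels s
      = (1 + runLen (pixels[j]'hj) (pixels.drop (j+1)), pixels[j]'hj) := by
  have hn : 0 < pixels.length := by omega
  have hget : PySem.List.pyGet? pixels s = some (pixels[j]'hj) := by
    rw [pyGet_neg pixels s h1 h2, hjdef, List.getElem?_eq_getElem hj]
  constructor
  · simp only [greedy_fill_search, hget]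
    rw [loop_run pixels _ _ s 1 h1 rfl]
    have hrs : readSeq pixels s = pixels.drop (j+1) ++ pixels := by
      simp only [readSeq, if_pos h2]
      congr 2
      omega
    rw [hrs]
  · simp only [greedy_fill_search_alt, hget, if_neg (by omega : ¬ 0 ≤ s)]
    have hjj : (s + (pixels.length : Int)).toNat = j := hjdef
    rw [hjj, runTable_getD pixels j hj]

-- ===== VERDICT (by name: the statement is the Claim_ definition above) =====
theorem greedy_fill_search_spec : Claim_unchanged_greedy_fill_search := by
  intro pixels s _hDom hPre hND
  obtain ⟨h1, h2⟩ := hPre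
  have hn : 0 < pixels.length := by by_contra h; omega
  by_cases hs : 0 ≤ s
  · -- nonnegative start index: A and B always agree
    have hb : s.toNat < pixels.length := by omega
    have hget : PySem.List.pyGet? pixels s = some pixels[s.toNat] := by
      rw [PySem.List.pyGet?_of_nonneg pixels hs, List.getElem?_eq_getElem hb]
    simp only [greedy_fill_search, greedy_fill_search_alt, hget, if_pos hs]
    rw [loop_run pixels _ _ s 1 (by omega) rfl]
    rw [runTable_getD pixels s.toNat hb]
    have hrs : readSeq pixels s = pixels.drop (s.toNat + 1) := by
      simp only [readSeq, if_neg (by omega : ¬ s < 0)]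
      congr 1
      omega
    rw [hrs]
  · -- negative start index, outside the change region D_
    have h2' : s < 0 := by omega
    obtain ⟨j, hjdef⟩ : ∃ j, (s + (pixels.length : Int)).toNat = j := ⟨_, rfl⟩
    have hj : j < pixels.length := by omega
    obtain ⟨hA, hB⟩ := neg_eval pixels s h1 h2' j hjdef hj
    have ht : pixels.drop j = pixels[j] :: pixels.drop (j+1) := List.drop_eq_getElem_cons hj
    rw [hA, hB, Prod.mk.injEq]
    refine ⟨?_, rfl⟩
    rw [runLen_append]
    by_cases hall : (pixels.drop (j+1)).all (fun p => p == pixels[j]'hj) = true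
    · rw [if_pos hall, runLen_all _ _ hall]
      have hne : pixels ≠ [] := List.ne_nil_of_length_pos hn
      have hhead : pixels.headI ≠ pixels[j]'hj := by
        intro hc
        apply hND
        unfold D_greedy_fill_search
        rw [hjdef]
        refine ⟨hne, h1, h2', ?_, ?_⟩
        · rw [ht]
          simp only [List.headI_cons, List.all_cons, beq_self_eq_true, Bool.true_and]
          exact hall
        · rw [ht, List.headI_cons]
          exact hc
      rw [runLen_eq_zero _ _ hhead]
      omega
    · rw [if_neg hall]

theorem greedy_fill_search_changed : Claim_changed_greedy_fill_search := by
  unfold Claim_changed_greedy_fill_search; decide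

theorem greedy_fill_search_tight : Claim_exact_greedy_fill_search := by
  intro pixels s _hDom hPre hD
  obtain ⟨h1, h2⟩ := hPre
  unfold D_greedy_fill_search at hD
  obtain ⟨hne, h1', h2', hall, hhead⟩ := hD
  have hn : 0 < pixels.length := by omega
  obtain ⟨j, hjdef⟩ : ∃ j, (s + (pixels.length : Int)).toNat = j := ⟨_, rfl⟩
  have hj : j < pixels.length := by omega
  rw [hjdef] at hall hhead
  have ht : pixels.drop j = pixels[j] :: pixels.drop (j+1) := List.drop_eq_getElem_cons hj
  rw [ht] at hall hhead
  simp only [List.headI_cons, List.all_cons, beq_self_eq_true, Bool.true_and] at hall hhead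
  obtain ⟨hA, hB⟩ := neg_eval pixels s h1 h2' j hjdef hj
  rw [hA, hB]
  intro heq
  have h1eq := congrArg Prod.fst heq
  simp only at h1eq
  rw [runLen_append, if_pos hall, runLen_all _ _ hall] at h1eq
  have hpos := runLen_pos (pixels[j]'hj) pixels hne hhead
  omega
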